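-- pv_equiv track=rewrite | github.com/00eemsy/google-feud | gf_data.py | mlist_set_up
-- ===== SOURCE A (Python) =====
-- def mlist_set_up(dictionary):
--
--     mlist = []
--     alphabet = ['a', 'b', 'c', 'd', 'e', 'f', 'g', 'h', 'i', 'j', 'k', 'l', 'm', 'n', 'o', 'p', 'q', 'r', 's', 't', 'u', 'v', 'x', 'y', 'z'] # to verify everything's in eng
--
--     # turning the dictionary into a list for easier access/manipulation (random access hehe)
--     for i in dictionary:
--         mlist.append(dictionary[i])
--
--         # bc the hl (home language) function of pytrends doesn't seem to work 100% of the time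
--         notEng = True
--         count = 0
--
--         while notEng and count < len(alphabet):
--             if alphabet[count] in dictionary[i]:
--                 notEng = False
--             else:
--                 count += 1
--
--         if notEng:
--             mlist.pop() # bye bye sorry foreign language search result :)
--
--     mlist.pop() # making sure further items don't go out of range elsewhere
--
--     return mlist
-- ===== SOURCE B (Python) =====
-- def mlist_set_up(dictionary):
--     # same alphabet as the original (note: it omits 'w')
--     letters = {'a', 'b', 'c', 'd', 'e', 'f', 'g', 'h', 'i', 'j', 'k', 'l', 'm',
--                'n', 'o', 'p', 'q', 'r', 's', 't', 'u', 'v', 'x', 'y', 'z'}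
--     mlist = [v for v in dictionary.values() if any(c in letters for c in v)]
--     mlist.pop()
--     return mlist
-- ===== Notes on version B (the rewrite author's own statement) =====
-- stated objective: idiomatic
-- what changed: Replaces the per-value scan over the 25-letter alphabet (each step a substring search, with a manual while/notEng/count flag loop and append-then-pop) by one comprehension over dictionary.values() keeping v when any character of v is in a letter set, i.e. a single pass over v's characters with set membership; the unconditional final pop is kept.
import Mathlib
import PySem

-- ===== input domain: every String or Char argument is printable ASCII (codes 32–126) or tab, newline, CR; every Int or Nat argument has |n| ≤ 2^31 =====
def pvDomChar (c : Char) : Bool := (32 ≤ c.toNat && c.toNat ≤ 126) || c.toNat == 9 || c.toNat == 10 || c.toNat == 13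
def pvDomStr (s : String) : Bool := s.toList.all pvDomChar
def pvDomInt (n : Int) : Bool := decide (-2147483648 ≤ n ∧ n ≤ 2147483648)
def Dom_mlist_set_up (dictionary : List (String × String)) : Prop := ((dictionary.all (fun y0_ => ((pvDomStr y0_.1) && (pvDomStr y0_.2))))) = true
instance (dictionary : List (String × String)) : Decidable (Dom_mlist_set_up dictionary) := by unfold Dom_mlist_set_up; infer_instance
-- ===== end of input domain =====

-- B replaces A's per-value 25-letter substring scan by one comprehension over the values
-- keeping v when any character of v lies in a letter set (idiomatic; same asymptotic cost).


-- ===== PORT A =====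
-- the alphabet list of A, verbatim (it omits 'w')
def pvAlphabet : List String :=
  ["a", "b", "c", "d", "e", "f", "g", "h", "i", "j", "k", "l", "m",
   "n", "o", "p", "q", "r", "s", "t", "u", "v", "x", "y", "z"]

-- the 'while notEng and count < len(alphabet)' loop: walks the alphabet from index
-- `count` on, returning the final value of notEng ('alphabet[count] in v' is Str.isIn)
def pvNotEng (v : String) : List String → Bool
  | [] => true
  | l :: rest => if PySem.Str.isIn l v then false else pvNotEng v rest

-- 'for i in dictionary: mlist.append(dictionary[i]); … if notEng: mlist.pop()'
-- iterating the dict yields its keys p.1; dictionary[i] is the dict lookup (always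
-- succeeds for an iterated key, whence .getD ""); the conditional pop removes the
-- element just appended.
def pvStepA (d : PySem.Dict String String) (mlist : List String)
    (p : String × String) : List String :=
  let v := (d.get? p.1).getD ""
  let mlist := mlist ++ [v]
  if pvNotEng v pvAlphabet then ((PySem.List.pop? mlist (-1)).map Prod.snd).getD [] else mlist

def mlist_set_up (dictionary : List (String × String)) : List String :=
  let d := PySem.Dict.mk dictionary
  let mlist := d.items.foldl (pvStepA d) []
  -- final unconditional mlist.pop(): raises IndexError on an empty list (excluded by Pre_)
  ((PySem.List.pop? mlist (-1)).map Prod.snd).getD []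

-- ===== PORT B =====
-- B's letter set (same alphabet, as a set of characters)
def pvLetters : PySem.Set Char :=
  PySem.Set.ofList ['a', 'b', 'c', 'd', 'e', 'f', 'g', 'h', 'i', 'j', 'k', 'l', 'm',
                    'n', 'o', 'p', 'q', 'r', 's', 't', 'u', 'v', 'x', 'y', 'z']

def mlist_set_up_alt (dictionary : List (String × String)) : List String :=
  let mlist := (PySem.Dict.mk dictionary).values.filter
    (fun v => v.toList.any (fun c => PySem.Set.contains pvLetters c))
  -- mlist.pop(): raises IndexError on an empty list (excluded by Pre_)
  ((PySem.List.pop? mlist (-1)).map Prod.snd).getD []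

-- ===== PRECONDITION & SPEC =====
-- Pre_ excludes association lists with duplicate keys (they do not represent a Python
-- dict, whose keys are unique) and inputs on which the list of kept values is empty,
-- where A's (and B's) final unconditional .pop() raises IndexError.
def Pre_mlist_set_up (dictionary : List (String × String)) : Prop :=
  (dictionary.map Prod.fst).Nodup ∧
  (dictionary.any (fun p => p.2.toList.any (fun c =>
    c ∈ ['a', 'b', 'c', 'd', 'e', 'f', 'g', 'h', 'i', 'j', 'k', 'l', 'm',
         'n', 'o', 'p', 'q', 'r', 's', 't', 'u', 'v', 'x', 'y', 'z']))) = true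
instance (dictionary : List (String × String)) : Decidable (Pre_mlist_set_up dictionary) := by
  unfold Pre_mlist_set_up; infer_instance

def pvWitness_mlist_set_up : (List (String × String)) := [("k", "a")]

def Spec_mlist_set_up (dictionary : List (String × String)) (out : List String) : Prop := out = mlist_set_up_alt dictionary
instance (dictionary : List (String × String)) (out : List String) : Decidable (Spec_mlist_set_up dictionary out) := by unfold Spec_mlist_set_up; infer_instance

-- ===== CLAIM (what is proved, stated in full; the proofs are below) =====
def Claim_equal_mlist_set_up : Prop := ∀ (dictionary : List (String × String)), Dom_mlist_set_up dictionary → Pre_mlist_set_up dictionary → Spec_mlist_set_up dictionary (mlist_set_up dictionary)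

-- ===== LEMMAS AND PROOFS =====

-- proof-side helper: the alphabet as characters (same 25 letters)
def pvAlphaChars : List Char :=
  ['a', 'b', 'c', 'd', 'e', 'f', 'g', 'h', 'i', 'j', 'k', 'l', 'm',
   'n', 'o', 'p', 'q', 'r', 's', 't', 'u', 'v', 'x', 'y', 'z']

theorem pvAlphabet_eq : pvAlphabet = pvAlphaChars.map (fun c => String.ofList [c]) := by decide

theorem pvLetters_contains (c : Char) : PySem.Set.contains pvLetters c = true ↔ c ∈ pvAlphaChars := by
  simp [pvLetters, pvAlphaChars, pysem]

-- 'alphabet[count] in v' for a one-letter alphabet entry tests character membership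
theorem pvIsIn_single (c : Char) (v : String) :
    PySem.Str.isIn (String.ofList [c]) v = v.toList.contains c := by
  rw [Bool.eq_iff_iff, PySem.Str.isIn_iff_infix]
  simp [List.singleton_infix_iff]

-- the while loop returns false iff some alphabet letter occurs in v
theorem pvNotEng_eq_false_iff (v : String) (ls : List String) :
    pvNotEng v ls = false ↔ ∃ l ∈ ls, PySem.Str.isIn l v = true := by
  induction ls with
  | nil => simp [pvNotEng]
  | cons l rest ih =>
    rw [pvNotEng]
    by_cases h : PySem.Str.isIn l v = true
    · rw [if_pos h]
      exact iff_of_true rfl ⟨l, List.mem_cons_self, h⟩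
    · rw [if_neg h, ih]
      constructor
      · rintro ⟨x, hx, hh⟩
        exact ⟨x, List.mem_cons_of_mem _ hx, hh⟩
      · rintro ⟨x, hx, hh⟩
        rcases List.mem_cons.mp hx with rfl | hx
        · exact absurd hh h
        · exact ⟨x, hx, hh⟩

-- A's keep-test and B's keep-test agree on every value
theorem pvTest_eq (v : String) :
    (pvNotEng v pvAlphabet = false) ↔
      (v.toList.any (fun c => PySem.Set.contains pvLetters c) = true) := by
  rw [pvNotEng_eq_false_iff, pvAlphabet_eq]
  simp only [List.mem_map, List.any_eq_true]
  constructor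
  · rintro ⟨l, ⟨c, hc, rfl⟩, hin⟩
    rw [pvIsIn_single] at hin
    exact ⟨c, by simpa using hin, (pvLetters_contains c).mpr hc⟩
  · rintro ⟨c, hc, hl⟩
    exact ⟨String.ofList [c], ⟨c, (pvLetters_contains c).mp hl, rfl⟩,
      by rw [pvIsIn_single]; simpa using hc⟩

-- A's fold over the items builds the filtered value list, given that every iterated
-- key looks up its own value (true when the keys are Nodup)
theorem pvFoldA_eq (d : PySem.Dict String String) (l : List (String × String)) (m : List String)
    (h : ∀ p ∈ l, d.get? p.1 = some p.2) :
    l.foldl (pvStepA d) m = m ++ (l.filter (fun p => !pvNotEng p.2 pvAlphabet)).map Prod.snd := by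
  induction l generalizing m with
  | nil => simp
  | cons p rest ih =>
    have hp : d.get? p.1 = some p.2 := h p (by simp)
    simp only [List.foldl_cons]
    rw [show pvStepA d m p =
        (if pvNotEng p.2 pvAlphabet then m else m ++ [p.2]) by
      simp only [pvStepA, hp, Option.getD_some, PySem.List.pop?_last]
      split_ifs <;> simp]
    split_ifs with hne
    · rw [ih _ (fun q hq => h q (by simp [hq]))]
      simp [hne]
    · rw [ih _ (fun q hq => h q (by simp [hq]))]
      simp [hne, List.append_assoc]

-- ===== VERDICT (by name: the statement is the Claim_ definition above) =====
theorem mlist_set_up_spec : Claim_equal_mlist_set_up := by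
  intro dictionary _hdom hpre
  obtain ⟨hnd, -⟩ := hpre
  have hkeys : (PySem.Dict.mk dictionary).keys.Nodup := by
    simpa [PySem.Dict.keys] using hnd
  have key : dictionary.foldl (pvStepA (PySem.Dict.mk dictionary)) []
      = ((PySem.Dict.mk dictionary).values).filter
          (fun v => v.toList.any (fun c => PySem.Set.contains pvLetters c)) := by
    rw [pvFoldA_eq _ _ _ (fun p hp => PySem.Dict.get?_of_mem_items _ (by simpa using hp) hkeys)]
    rw [show (PySem.Dict.mk dictionary).values = dictionary.map Prod.snd from rfl, List.filter_map]
    simp only [List.nil_append]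
    congr 1
    apply List.filter_congr
    intro p _
    simp only [Function.comp]
    rw [Bool.eq_iff_iff, Bool.not_eq_true']
    exact pvTest_eq p.2
  unfold Spec_mlist_set_up
  show ((PySem.List.pop? (dictionary.foldl (pvStepA (PySem.Dict.mk dictionary)) []) (-1)).map Prod.snd).getD []
      = ((PySem.List.pop? (((PySem.Dict.mk dictionary).values).filter
            (fun v => v.toList.any (fun c => PySem.Set.contains pvLetters c))) (-1)).map Prod.snd).getD []
  rw [key]
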